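-- pv_equiv track=rewrite | github.com/heysanjeev1110/RAG_Advanced_Customer_Support | example3.py | _normalize_sql_for_psycopg2
-- ===== SOURCE A (Python) =====
-- def _normalize_sql_for_psycopg2(sql: str) -> str:
--     """Normalize SQL parameters for psycopg2 execution using simple string operations."""
--     # Convert %param to %(param)s - simple string replacement
--     # Find all %word patterns and convert them
--     words = sql.split()
--     normalized_parts = []
--     for word in words:
--         if word.startswith("%") and len(word) > 1 and word[1].isalpha():
--             # Convert %param to %(param)s
--             param_name = word[1:].rstrip(";,")  # Remove trailing punctuation
--             normalized_word = f"%({param_name})s"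
--             normalized_parts.append(normalized_word)
--         else:
--             normalized_parts.append(word)
--
--     sql_normalized = " ".join(normalized_parts)
--
--     # Replace clnt_id with client_id (simple string replace)
--     sql_normalized = sql_normalized.replace("clnt_id", "client_id")
--     sql_normalized = sql_normalized.replace("CLNT_ID", "client_id")
--
--     return sql_normalized
-- ===== SOURCE B (Python) =====
-- def _normalize_sql_for_psycopg2(sql: str) -> str:
--     """Single streaming scan: emit tokens directly, no intermediate word list."""
--     out = []
--     i, n, first = 0, len(sql), True
--     while i < n:
--         if sql[i].isspace():
--             i += 1
--             continue
--         j = i + 1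
--         while j < n and not sql[j].isspace():
--             j += 1
--         word = sql[i:j]
--         if word[0] == "%" and len(word) > 1 and word[1].isalpha():
--             word = "%(" + word[1:].rstrip(";,") + ")s"
--         if not first:
--             out.append(" ")
--         out.append(word)
--         first = False
--         i = j
--     s = "".join(out)
--     s = s.replace("clnt_id", "client_id")
--     return s.replace("CLNT_ID", "client_id")
-- ===== Notes on version B (the rewrite author's own statement) =====
-- stated objective: alternative
-- what changed: Replaces split()/per-token list/join with a single streaming index scan over the characters that skips whitespace runs and emits each (possibly rewritten) token directly into the output.
import Mathlib
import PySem

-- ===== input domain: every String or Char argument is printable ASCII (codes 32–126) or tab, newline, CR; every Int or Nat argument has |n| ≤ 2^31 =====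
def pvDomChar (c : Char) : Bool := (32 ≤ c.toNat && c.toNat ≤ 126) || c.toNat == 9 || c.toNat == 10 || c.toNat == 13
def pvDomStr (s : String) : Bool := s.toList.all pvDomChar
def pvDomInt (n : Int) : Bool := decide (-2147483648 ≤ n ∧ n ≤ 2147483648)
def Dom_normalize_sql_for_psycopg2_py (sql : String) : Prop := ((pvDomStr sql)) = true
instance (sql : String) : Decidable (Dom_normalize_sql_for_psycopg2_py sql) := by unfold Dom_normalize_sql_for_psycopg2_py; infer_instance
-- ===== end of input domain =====

-- B replaces A's split()/per-token list/join pipeline with a single streaming scan over the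
-- characters that emits each (possibly rewritten) token directly (objective: alternative).

-- ===== PORT A =====
-- port of word[1:].rstrip(";,"): drop trailing ';'/',' characters (exact: rstrip with an
-- explicit char set has no PySem primitive)
def pvRstripPunctA (w : List Char) : List Char :=
  (w.reverse.dropWhile (fun c => c == ';' || c == ',')).reverse

-- the body of A's per-word branch, step for step
def pvFixWordA (word : List Char) : List Char :=
  if PySem.Chars.startswith word ['%'] && decide (1 < PySem.Chars.len word)
      && (match PySem.List.pyGet? word 1 with
          | some c => PySem.Chars.isalpha c
          | none => false) then
    let param_name := pvRstripPunctA (PySem.Chars.slice word (some 1) none)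
    ['%', '('] ++ param_name ++ [')', 's']
  else word

def pvACore (s : List Char) : List Char :=
  let words := PySem.Chars.split₀ s
  let normalized_parts := words.foldl (fun acc w => acc ++ [pvFixWordA w]) []
  let sql_normalized := PySem.Chars.join [' '] normalized_parts
  let sql_normalized := PySem.Chars.replace sql_normalized "clnt_id".toList "client_id".toList
  PySem.Chars.replace sql_normalized "CLNT_ID".toList "client_id".toList

def normalize_sql_for_psycopg2_py (sql : String) : String :=
  String.mk (pvACore sql.toList)

-- ===== PORT B =====
def pvNotSpace (c : Char) : Bool := !PySem.Chars.isspace c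

-- B's inner rewrite of one scanned token (pattern form of the %param test)
def pvFixWordB (word : List Char) : List Char :=
  match word with
  | '%' :: d :: tl =>
    if PySem.Chars.isalpha d then
      '%' :: '(' :: (((d :: tl).reverse.dropWhile (fun c => c == ';' || c == ',')).reverse ++ [')', 's'])
    else word
  | _ => word

-- B's streaming scan: skip a whitespace run, cut the next token, emit it (with a separating
-- space unless it is the first), continue after it
def pvBScan : List Char → Bool → List Char
  | [], _ => []
  | c :: rest, first =>
    if PySem.Chars.isspace c then pvBScan rest first
    else
      (if first then [] else [' ']) ++ pvFixWordB (c :: rest.takeWhile pvNotSpace)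
        ++ pvBScan (rest.dropWhile pvNotSpace) false
  termination_by s _ => s.length
  decreasing_by
  all_goals simp
  all_goals exact List.length_dropWhile_le _ _

def normalize_sql_for_psycopg2_py_alt (sql : String) : String :=
  String.mk
    (PySem.Chars.replace
      (PySem.Chars.replace (pvBScan sql.toList true) "clnt_id".toList "client_id".toList)
      "CLNT_ID".toList "client_id".toList)

-- ===== PRECONDITION & SPEC =====
def Spec_normalize_sql_for_psycopg2_py (sql : String) (out : String) : Prop := out = normalize_sql_for_psycopg2_py_alt sql
instance (sql : String) (out : String) : Decidable (Spec_normalize_sql_for_psycopg2_py sql out) := by unfold Spec_normalize_sql_for_psycopg2_py; infer_instance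

-- ===== CLAIM (what is proved, stated in full; the proofs are below) =====
def Claim_equal_normalize_sql_for_psycopg2_py : Prop := ∀ (sql : String), Dom_normalize_sql_for_psycopg2_py sql → Spec_normalize_sql_for_psycopg2_py sql (normalize_sql_for_psycopg2_py sql)

-- ===== LEMMAS AND PROOFS =====

-- the token list B's scan walks through, as a standalone function (proof helper only)
def pvTokens : List Char → List (List Char)
  | [] => []
  | c :: rest =>
    if PySem.Chars.isspace c then pvTokens rest
    else (c :: rest.takeWhile pvNotSpace) :: pvTokens (rest.dropWhile pvNotSpace)
  termination_by s => s.length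
  decreasing_by
  all_goals simp
  all_goals exact List.length_dropWhile_le _ _

-- invariant of split₀'s worker: it produces exactly pvTokens, modulo the open word / accumulator
theorem pvSplitGo_eq (s : List Char) : ∀ (cur : List Char) (acc : List (List Char)),
    PySem.Chars.split₀.go s cur acc =
      acc.reverse ++ (if cur.isEmpty then pvTokens s
        else (cur.reverse ++ s.takeWhile pvNotSpace) :: pvTokens (s.dropWhile pvNotSpace)) := by
  induction s with
  | nil =>
    intro cur acc
    simp only [PySem.Chars.split₀.go]
    by_cases h : cur.isEmpty <;> simp [h, pvTokens]
  | cons c rest ih =>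
    intro cur acc
    rw [PySem.Chars.split₀.go]
    by_cases hs : PySem.Chars.isspace c
    · by_cases hc : cur.isEmpty
      · rw [pvTokens]
        simp [hs, hc, ih]
      · rw [pvTokens]
        simp only [hs, hc, if_true, if_false, Bool.false_eq_true]
        rw [ih [] (cur.reverse :: acc)]
        simp [List.takeWhile, List.dropWhile, pvNotSpace, hs]
        rw [pvTokens]
        simp [hs]
    · rw [ih (c :: cur) acc]
      have hns : pvNotSpace c = true := by simp [pvNotSpace, hs]
      by_cases hc : cur.isEmpty
      · have : cur = [] := by simpa using hc
        subst this
        rw [pvTokens]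
        simp [hs]
      · simp [hc, List.takeWhile, List.dropWhile, hns, hs]

theorem pvTokens_eq_split₀ (s : List Char) : PySem.Chars.split₀ s = pvTokens s := by
  simp [PySem.Chars.split₀, pvSplitGo_eq]

-- A's per-word transform and B's pattern-match transform agree on every word
theorem pvFix_eq (w : List Char) : pvFixWordA w = pvFixWordB w := by
  match w with
  | [] => rfl
  | [c] =>
    simp [pvFixWordA, pvFixWordB, PySem.Chars.len]
  | c :: d :: tl =>
    by_cases hc : c = '%'
    · subst hc
      by_cases hd : PySem.Chars.isalpha d
      · simp [pvFixWordA, pvFixWordB, PySem.Chars.len, PySem.Chars.startswith, List.isPrefixOf,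
          PySem.List.pyGet?, PySem.List.pyIdx?, hd, pvRstripPunctA]
        rw [show PySem.List.slice ('%' :: d :: tl) (some 1) = d :: tl from by simp [pysem]]
        simp
      · simp [pvFixWordA, pvFixWordB, PySem.Chars.len, PySem.Chars.startswith, List.isPrefixOf,
          PySem.List.pyGet?, PySem.List.pyIdx?, hd]
    · have : pvFixWordB (c :: d :: tl) = c :: d :: tl := by
        unfold pvFixWordB
        split
        · next h => injection h with h1 _; exact (hc h1).elim
        · rfl
      rw [this]
      simp [pvFixWordA, PySem.Chars.startswith, List.isPrefixOf]
      intro h; exact (hc h.symm).elim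

theorem pvJoin_cons (ws : List (List Char)) : ∀ (w : List Char),
    PySem.Chars.join [' '] (w :: ws) = w ++ ws.flatMap (fun x => ' ' :: x) := by
  induction ws with
  | nil => intro w; simp [PySem.Chars.join_singleton]
  | cons x xs ih =>
    intro w
    rw [PySem.Chars.join_cons_cons, ih x]
    simp

theorem pvBScan_false_aux : ∀ (n : Nat) (s : List Char), s.length ≤ n →
    pvBScan s false = (pvTokens s).flatMap (fun w => ' ' :: pvFixWordB w) := by
  intro n
  induction n with
  | zero =>
    intro s hs
    have : s = [] := by cases s <;> simp_all
    subst this; rw [pvBScan, pvTokens]; rfl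
  | succ n ih =>
    intro s hs
    match s with
    | [] => rw [pvBScan, pvTokens]; rfl
    | c :: rest =>
      rw [pvBScan, pvTokens]
      by_cases hc : PySem.Chars.isspace c
      · simp only [hc, if_true]
        exact ih rest (by simpa using Nat.le_of_succ_le_succ hs)
      · simp only [hc, if_false, Bool.false_eq_true, List.flatMap_cons]
        rw [ih (rest.dropWhile pvNotSpace)
          (Nat.le_trans (List.length_dropWhile_le _ _) (Nat.le_of_succ_le_succ hs))]
        simp

theorem pvBScan_true_aux : ∀ (n : Nat) (s : List Char), s.length ≤ n →
    pvBScan s true = PySem.Chars.join [' '] ((pvTokens s).map pvFixWordB) := by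
  intro n
  induction n with
  | zero =>
    intro s hs
    have : s = [] := by cases s <;> simp_all
    subst this; rw [pvBScan, pvTokens]; simp [PySem.Chars.join_nil]
  | succ n ih =>
    intro s hs
    match s with
    | [] => rw [pvBScan, pvTokens]; simp [PySem.Chars.join_nil]
    | c :: rest =>
      rw [pvBScan, pvTokens]
      by_cases hc : PySem.Chars.isspace c
      · simp only [hc, if_true]
        exact ih rest (by simpa using Nat.le_of_succ_le_succ hs)
      · simp only [hc, if_false, Bool.false_eq_true, List.map_cons]
        rw [pvJoin_cons, pvBScan_false_aux rest.length (rest.dropWhile pvNotSpace)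
          (List.length_dropWhile_le _ _)]
        simp [List.flatMap_map]

-- ===== VERDICT (by name: the statement is the Claim_ definition above) =====
theorem normalize_sql_for_psycopg2_py_spec : Claim_equal_normalize_sql_for_psycopg2_py := by
  intro sql _
  simp only [Spec_normalize_sql_for_psycopg2_py, normalize_sql_for_psycopg2_py,
    normalize_sql_for_psycopg2_py_alt, pvACore]
  rw [PySem.List.foldl_append_singleton_eq_map, pvTokens_eq_split₀,
    pvBScan_true_aux sql.toList.length sql.toList le_rfl]
  simp [List.map_congr_left (fun w _ => pvFix_eq w)]
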